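-- pv_equiv track=rewrite | github.com/1mozolacal/DataScienceChallengeSaloneverywhere | src/python/anaylizer.py | asciiCleaner
-- ===== SOURCE A (Python) =====
-- def asciiCleaner(string):
--     if string is None:
--         return None
--     newString = ""
--     for char in string:
--         intChar = ord(char)
--         if (65<=intChar<=90) or (97<=intChar<=122) or (intChar==32):
--             newString+=char
--     return newString
-- ===== SOURCE B (Python) =====
-- import re
--
-- def asciiCleaner(string):
--     if string is None:
--         return None
--     return re.sub(r'[^A-Za-z ]', '', string)
-- ===== Notes on version B (the rewrite author's own statement) =====
-- stated objective: idiomatic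
-- what changed: Replaced the explicit character loop with ord-range tests and string accumulator by a single regex substitution deleting everything outside [A-Za-z ].
import Mathlib
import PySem

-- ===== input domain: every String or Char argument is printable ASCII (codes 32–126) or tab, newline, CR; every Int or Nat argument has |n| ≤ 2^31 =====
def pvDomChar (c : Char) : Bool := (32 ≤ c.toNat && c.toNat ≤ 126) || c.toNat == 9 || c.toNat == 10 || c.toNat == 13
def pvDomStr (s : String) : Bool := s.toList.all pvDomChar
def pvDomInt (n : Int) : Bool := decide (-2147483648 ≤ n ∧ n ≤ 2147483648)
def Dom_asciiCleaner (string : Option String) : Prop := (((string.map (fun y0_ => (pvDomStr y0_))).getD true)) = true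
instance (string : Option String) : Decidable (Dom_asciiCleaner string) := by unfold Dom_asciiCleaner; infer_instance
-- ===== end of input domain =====

-- B replaces A's explicit ord-range loop and string accumulator by a single
-- regex substitution deleting every character outside [A-Za-z ] (idiomatic).

-- ===== PORT A =====
-- the for-loop over the string's characters, accumulating newString via +=
def asciiCleaner (string : Option String) : Option String :=
  match string with
  | none => none
  | some s =>
      some (String.ofList (s.toList.foldl
        (fun newString char =>
          let intChar := char.toNat
          if (65 ≤ intChar ∧ intChar ≤ 90) ∨ (97 ≤ intChar ∧ intChar ≤ 122) ∨ intChar = 32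
          then newString ++ [char] else newString) []))

-- ===== PORT B =====
-- re.sub(r'[^A-Za-z ]', '', s): hand port (PySem has no regex) — deleting every
-- character not in the class [A-Za-z ] is exactly filtering by class membership.
def asciiCleaner_alt (string : Option String) : Option String :=
  match string with
  | none => none
  | some s =>
      some (String.ofList (s.toList.filter
        (fun c => ('A' ≤ c && c ≤ 'Z') || ('a' ≤ c && c ≤ 'z') || c == ' ')))

-- ===== PRECONDITION & SPEC =====
def Spec_asciiCleaner (string : Option String) (out : Option String) : Prop := out = asciiCleaner_alt string
instance (string : Option String) (out : Option String) : Decidable (Spec_asciiCleaner string out) := by unfold Spec_asciiCleaner; infer_instance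

-- ===== CLAIM (what is proved, stated in full; the proofs are below) =====
def Claim_equal_asciiCleaner : Prop := ∀ (string : Option String), Dom_asciiCleaner string → Spec_asciiCleaner string (asciiCleaner string)

-- ===== LEMMAS AND PROOFS =====
-- the two per-character tests agree
theorem pvKeep_eq (c : Char) :
    (decide ((65 ≤ c.toNat ∧ c.toNat ≤ 90) ∨ (97 ≤ c.toNat ∧ c.toNat ≤ 122) ∨ c.toNat = 32))
      = (('A' ≤ c && c ≤ 'Z') || ('a' ≤ c && c ≤ 'z') || c == ' ') := by
  rw [Bool.eq_iff_iff]
  simp only [decide_eq_true_eq, Bool.or_eq_true, Bool.and_eq_true, decide_eq_true_eq,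
    Char.le_def, UInt32.le_iff_toNat_le, beq_iff_eq, Char.ext_iff, ← UInt32.toNat_inj,
    show ('A'.val.toNat = 65) from rfl, show ('Z'.val.toNat = 90) from rfl,
    show ('a'.val.toNat = 97) from rfl, show ('z'.val.toNat = 122) from rfl,
    show (' '.val.toNat = 32) from rfl, show (Char.toNat c = c.val.toNat) from rfl]
  omega

-- ===== VERDICT (by name: the statement is the Claim_ definition above) =====
theorem asciiCleaner_spec : Claim_equal_asciiCleaner := by
  intro string _
  unfold Spec_asciiCleaner asciiCleaner asciiCleaner_alt
  cases string with
  | none => rfl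
  | some s =>
      simp only [PySem.List.foldl_append_ite_eq_filter]
      rw [List.filter_congr (fun c _ => (pvKeep_eq c)), List.nil_append]
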